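-- pv_equiv track=rewrite | github.com/Brahminladka/hidden-camera- | build_camguard_intelligence.py | unique_hints
-- ===== SOURCE A (Python) =====
-- def unique_hints(existing, extra):
--     merged = list(existing) + list(extra)
--     out = []
--     seen = set()
--     for item in merged:
--         if item not in seen:
--             seen.add(item)
--             out.append(item)
--         if len(out) == 5:
--             break
--     return out
-- ===== SOURCE B (Python) =====
-- def unique_hints(existing, extra):
--     rest = list(existing) + list(extra)
--     out = []
--     while rest and len(out) < 5:
--         head = rest[0]
--         out.append(head)
--         rest = [x for x in rest[1:] if x != head]
--     return out
-- ===== Notes on version B (the rewrite author's own statement) =====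
-- stated objective: alternative
-- what changed: Instead of one pass with a seen-set and early break, B repeatedly takes the head of the remaining merged list and filters out all its duplicates (at most five select-and-filter passes), so no seen structure is maintained at all.
import Mathlib
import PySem

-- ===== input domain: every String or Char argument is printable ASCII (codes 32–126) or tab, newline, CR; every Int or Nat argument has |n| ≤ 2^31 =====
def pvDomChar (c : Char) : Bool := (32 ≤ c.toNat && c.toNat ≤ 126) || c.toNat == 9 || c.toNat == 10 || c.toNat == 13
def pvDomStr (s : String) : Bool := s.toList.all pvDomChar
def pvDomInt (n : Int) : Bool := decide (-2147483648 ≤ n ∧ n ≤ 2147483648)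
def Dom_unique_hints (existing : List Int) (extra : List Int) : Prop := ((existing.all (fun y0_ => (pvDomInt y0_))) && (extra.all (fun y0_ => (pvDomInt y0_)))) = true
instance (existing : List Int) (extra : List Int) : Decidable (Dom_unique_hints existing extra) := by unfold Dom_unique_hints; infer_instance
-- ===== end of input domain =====

-- B replaces A's seen-set single pass (with early break) by a select-head-then-
-- filter-out-its-duplicates loop over the remaining merged list (alternative).


-- ===== PORT A =====
-- the 'for item in merged' loop with state (seen, out) and 'break' when len(out) == 5
def uhLoop : List Int → PySem.Set Int → List Int → List Int
  | [], _, out => out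
  | item :: rest, seen, out =>
    let st := if !(PySem.Set.contains seen item)
              then (PySem.Set.add seen item, out ++ [item])
              else (seen, out)
    if st.2.length = 5 then st.2 else uhLoop rest st.1 st.2

def unique_hints (existing : List Int) (extra : List Int) : List Int :=
  uhLoop (existing ++ extra) PySem.Set.empty []

-- ===== PORT B =====
-- the 'while rest and len(out) < 5' loop: append the head, filter its duplicates out
def uhbLoop : List Int → List Int → List Int
  | [], out => out
  | head :: t, out =>
    if out.length < 5 then uhbLoop (t.filter (fun x => x != head)) (out ++ [head]) else out
termination_by rest _ => rest.length
decreasing_by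
  simp only [List.length_unattach]
  exact Nat.lt_succ_of_le (le_trans (List.length_filter_le _ _) (by simp))

def unique_hints_alt (existing : List Int) (extra : List Int) : List Int :=
  uhbLoop (existing ++ extra) []

-- ===== PRECONDITION & SPEC =====
def Spec_unique_hints (existing : List Int) (extra : List Int) (out : List Int) : Prop := out = unique_hints_alt existing extra
instance (existing : List Int) (extra : List Int) (out : List Int) : Decidable (Spec_unique_hints existing extra out) := by unfold Spec_unique_hints; infer_instance

-- ===== CLAIM (what is proved, stated in full; the proofs are below) =====
def Claim_equal_unique_hints : Prop := ∀ (existing : List Int) (extra : List Int), Dom_unique_hints existing extra → Spec_unique_hints existing extra (unique_hints existing extra)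

-- ===== LEMMAS AND PROOFS =====

-- Set.add only appends, so the current state is a prefix of the final fold.
lemma prefix_foldl_add (l : List Int) (s : PySem.Set Int) :
    s <+: l.foldl PySem.Set.add s := by
  induction l generalizing s with
  | nil => exact List.prefix_rfl
  | cons x xs ih =>
    refine List.IsPrefix.trans ?_ (ih (PySem.Set.add s x))
    rw [PySem.Set.add_eq_ite]
    split
    · exact List.prefix_rfl
    · exact ⟨[x], rfl⟩

-- In A the two state components are always the same list; the loop computes
-- the 5-prefix of folding Set.add over the remaining items.
lemma uhLoop_eq (l : List Int) (s : PySem.Set Int) (h : s.length < 5) :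
    uhLoop l s s = (l.foldl PySem.Set.add s).take 5 := by
  induction l generalizing s with
  | nil =>
    simp [uhLoop, List.take_of_length_le (Nat.le_of_lt h)]
  | cons x xs ih =>
    by_cases hx : x ∈ s
    · have hc : PySem.Set.contains s x = true := by simp [hx]
      have hadd : PySem.Set.add s x = s := PySem.Set.add_of_mem hx
      simp only [uhLoop, hc, Bool.not_true, Bool.false_eq_true, if_false]
      simp only [if_neg (Nat.ne_of_lt h)]
      rw [ih s h, List.foldl_cons, hadd]
    · have hc : PySem.Set.contains s x = false := by
        simp [hx]
      have hadd : PySem.Set.add s x = s ++ [x] := PySem.Set.add_of_not_mem hx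
      simp only [uhLoop, hc, Bool.not_false, if_true]
      rw [List.foldl_cons, hadd]
      by_cases h5 : (s ++ [x]).length = 5
      · simp only [h5, if_true]
        obtain ⟨t, ht⟩ := prefix_foldl_add xs (s ++ [x])
        rw [← ht, ← h5, List.take_left]
      · simp only [h5, if_false]
        have hlt : (s ++ [x]).length < 5 := by
          simp only [List.length_append, List.length_singleton] at h5 ⊢
          omega
        exact ih (s ++ [x]) hlt

-- Order-preserving dedup commutes with filtering.
lemma ofList_filter (p : Int → Bool) (t : List Int) :
    PySem.Set.ofList (t.filter p) = (PySem.Set.ofList t).filter p := by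
  induction t with
  | nil => simp [PySem.Set.ofList_nil]
  | cons y ys ih =>
    by_cases hp : p y = true
    · rw [List.filter_cons_of_pos hp, PySem.Set.ofList_cons, PySem.Set.ofList_cons,
        List.filter_cons_of_pos hp, ih]
      simp only [PySem.Set.discard, List.filter_filter]
      congr 1
      exact List.filter_congr (fun x _ => by rw [Bool.and_comm])
    · have hp' : p y = false := by simpa using hp
      rw [List.filter_cons_of_neg (by simp [hp']), PySem.Set.ofList_cons,
        List.filter_cons_of_neg (by simp [hp']), ih]
      simp only [PySem.Set.discard, List.filter_filter]
      refine List.filter_congr (fun x _ => ?_)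
      by_cases hxy : x = y
      · subst hxy; simp [hp']
      · simp [hxy]

-- discard removes exactly the duplicates of the head.
lemma discard_eq_ofList_filter (t : List Int) (h : Int) :
    PySem.Set.discard (PySem.Set.ofList t) h
      = PySem.Set.ofList (t.filter (fun x => x != h)) := by
  rw [ofList_filter]
  simp [PySem.Set.discard, bne]

-- B's loop computes out followed by the (5 - len out)-prefix of the dedup.
lemma uhbLoop_eq_aux (n : Nat) : ∀ (l out : List Int), l.length ≤ n → out.length ≤ 5 →
    uhbLoop l out = out ++ (PySem.Set.ofList l).take (5 - out.length) := by
  induction n with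
  | zero =>
    intro l out hl _
    have : l = [] := List.eq_nil_of_length_eq_zero (Nat.le_zero.mp hl)
    subst this
    simp [uhbLoop, PySem.Set.ofList_nil]
  | succ n ih =>
    intro l out hl h
    cases l with
    | nil => simp [uhbLoop, PySem.Set.ofList_nil]
    | cons head t =>
      by_cases hlt : out.length < 5
      · rw [uhbLoop, if_pos hlt]
        rw [ih (t.filter (fun x => x != head)) (out ++ [head])
          (le_trans (List.length_filter_le _ _) (by simpa using Nat.lt_succ_iff.mp hl))
          (by simpa using Nat.succ_le_of_lt hlt)]
        rw [PySem.Set.ofList_cons, discard_eq_ofList_filter]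
        have : 5 - out.length = (5 - (out ++ [head]).length) + 1 := by
          simp only [List.length_append, List.length_singleton]; omega
        rw [this, List.take_succ_cons]
        simp
      · rw [uhbLoop, if_neg hlt]
        have : out.length = 5 := by omega
        simp [this]

lemma uhbLoop_eq (l out : List Int) (h : out.length ≤ 5) :
    uhbLoop l out = out ++ (PySem.Set.ofList l).take (5 - out.length) :=
  uhbLoop_eq_aux l.length l out le_rfl h

-- ===== VERDICT (by name: the statement is the Claim_ definition above) =====
theorem unique_hints_spec : Claim_equal_unique_hints := by
  intro existing extra _
  show unique_hints existing extra = unique_hints_alt existing extra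
  unfold unique_hints unique_hints_alt
  show uhLoop (existing ++ extra) PySem.Set.empty PySem.Set.empty = _
  rw [uhLoop_eq (existing ++ extra) PySem.Set.empty (by simp [PySem.Set.empty])]
  rw [uhbLoop_eq (existing ++ extra) [] (by simp)]
  simp [PySem.Set.ofList_eq_foldl, PySem.Set.empty]
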